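-- pv_equiv track=rewrite | github.com/subrotonpi/clone_transcompiler | data/data_transpiled/at_coder/abc105/C/4048699.py | ketasu
-- ===== SOURCE A (Python) =====
-- def ketasu ( n ) :
--     import sys
--     if n >= 0 :
--         ketasu = 1
--         jougen = 1
--         base = 1
--         for i in range ( 0 , n ) :
--             ketasu = ketasu + 2
--             base *= 4
--             jougen += base
--         return ketasu
--     else :
--         ketasu = 0
--         jougen = 0
--         base = - 2
--         for i in range ( 0 , jougen ) :
--             ketasu = ketasu + 2
--             jougen += base
--             base *= 4
--         return ketasu
-- ===== SOURCE B (Python) =====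
-- def ketasu(n):
--     return 2 * n + 1 if n >= 0 else 0
-- ===== Notes on version B (the rewrite author's own statement) =====
-- stated objective: simpler
-- what changed: Replaces both loops and the dead base/jougen bookkeeping by a single closed-form arithmetic expression (twice the input plus one for nonnegative input, zero otherwise).
import Mathlib
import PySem

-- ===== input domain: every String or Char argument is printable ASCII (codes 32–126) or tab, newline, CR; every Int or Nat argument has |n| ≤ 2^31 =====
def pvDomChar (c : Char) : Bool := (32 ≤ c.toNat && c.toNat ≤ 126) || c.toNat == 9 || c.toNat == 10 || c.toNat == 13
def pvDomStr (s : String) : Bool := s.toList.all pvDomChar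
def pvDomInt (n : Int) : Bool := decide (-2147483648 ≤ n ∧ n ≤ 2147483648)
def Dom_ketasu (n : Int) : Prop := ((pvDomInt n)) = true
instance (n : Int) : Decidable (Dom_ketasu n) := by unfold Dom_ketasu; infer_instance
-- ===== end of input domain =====

-- B replaces A's loops and dead base/jougen bookkeeping by the closed form 2*n+1 (0 for negative n); objective: simpler.

-- ===== PORT A =====
def ketasu (n : Int) : Int :=
  if n ≥ 0 then
    let st := (PySem.List.pyRange 0 n 1).foldl
      (fun (s : Int × Int × Int) _ =>
        let (k, j, b) := s
        (k + 2, j + b * 4, b * 4)) (1, 1, 1)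
    st.1
  else
    let st := (PySem.List.pyRange 0 0 1).foldl
      (fun (s : Int × Int × Int) _ =>
        let (k, j, b) := s
        (k + 2, j + b, b * 4)) (0, 0, -2)
    st.1

-- ===== PORT B =====
def ketasu_alt (n : Int) : Int := if n ≥ 0 then 2 * n + 1 else 0

-- ===== PRECONDITION & SPEC =====
def Spec_ketasu (n : Int) (out : Int) : Prop := out = ketasu_alt n
instance (n : Int) (out : Int) : Decidable (Spec_ketasu n out) := by unfold Spec_ketasu; infer_instance

-- ===== CLAIM (what is proved, stated in full; the proofs are below) =====
def Claim_equal_ketasu : Prop := ∀ (n : Int), Dom_ketasu n → Spec_ketasu n (ketasu n)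

-- ===== LEMMAS AND PROOFS =====
theorem ketasu_fold_fst (l : List Int) (k j b : Int) :
    (l.foldl (fun (s : Int × Int × Int) _ =>
        let (k, j, b) := s
        (k + 2, j + b * 4, b * 4)) (k, j, b)).1 = k + 2 * l.length := by
  induction l generalizing k j b with
  | nil => simp
  | cons x xs ih => simp [List.foldl, ih]; ring

-- ===== VERDICT (by name: the statement is the Claim_ definition above) =====
theorem ketasu_spec : Claim_equal_ketasu := by
  intro n _
  unfold Spec_ketasu ketasu ketasu_alt
  split_ifs with h
  · rw [ketasu_fold_fst]
    rw [PySem.List.length_pyRange_one]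
    omega
  · simp [PySem.List.pyRange]
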